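-- pv_equiv track=rewrite | github.com/aidenkoog/epic-til | ProblemSolving/actual_test/spiral_sum.py | spiral_sum
-- ===== SOURCE A (Python) =====
-- def spiral_sum(matrix):
--     if not matrix or not matrix[0]:  # 예외 처리 (빈 배열)
--         return 0
--
--     top, bottom = 0, len(matrix) - 1  # 상단, 하단 경계
--     left, right = 0, len(matrix[0]) - 1  # 좌측, 우측 경계
--     total_sum = 0
--
--     while top <= bottom and left <= right:
--         # 상단 행 순회 (왼쪽 → 오른쪽)
--         for i in range(left, right + 1):
--             total_sum += matrix[top][i]
--         top += 1  # 상단 경계 줄이기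
--
--         # 우측 열 순회 (위 → 아래)
--         for i in range(top, bottom + 1):
--             total_sum += matrix[i][right]
--         right -= 1  # 우측 경계 줄이기
--
--         # 하단 행 순회 (오른쪽 → 왼쪽)
--         if top <= bottom:
--             for i in range(right, left - 1, -1):
--                 total_sum += matrix[bottom][i]
--             bottom -= 1  # 하단 경계 줄이기
--
--         # 좌측 열 순회 (아래 → 위)
--         if left <= right:
--             for i in range(bottom, top - 1, -1):
--                 total_sum += matrix[i][left]
--             left += 1  # 좌측 경계 줄이기
--
--     return total_sum
-- ===== SOURCE B (Python) =====
-- def spiral_sum(matrix):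
--     # Spiral order visits every cell of the h x w rectangle exactly once,
--     # so the spiral sum is just the sum of the first w entries of each row.
--     if not matrix or not matrix[0]:
--         return 0
--     w = len(matrix[0])
--     return sum(sum(row[:w]) for row in matrix)
-- ===== Notes on version B (the rewrite author's own statement) =====
-- stated objective: simpler
-- what changed: B drops the four-sided boundary walk entirely: since the spiral visits every cell of the h x w rectangle exactly once, it returns the sum of the first len(matrix[0]) entries of each row in one pass.
import Mathlib
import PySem

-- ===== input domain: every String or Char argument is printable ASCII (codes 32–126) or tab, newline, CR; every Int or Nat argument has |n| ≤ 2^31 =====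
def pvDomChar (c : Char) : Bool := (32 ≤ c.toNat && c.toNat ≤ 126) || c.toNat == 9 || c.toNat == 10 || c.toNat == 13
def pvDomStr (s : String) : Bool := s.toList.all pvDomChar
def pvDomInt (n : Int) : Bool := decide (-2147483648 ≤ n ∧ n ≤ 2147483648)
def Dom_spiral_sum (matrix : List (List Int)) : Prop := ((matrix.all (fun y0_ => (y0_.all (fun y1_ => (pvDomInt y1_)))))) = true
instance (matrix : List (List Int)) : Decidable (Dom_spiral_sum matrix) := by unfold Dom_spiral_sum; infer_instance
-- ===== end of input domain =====

-- B replaces the four-sided boundary walk by one pass: spiral order visits every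
-- cell of the h×w rectangle exactly once, so the answer is the sum of the first
-- w entries of each row (objective: simpler).

-- ===== PORT A =====
-- matrix[i][j] (two chained IndexError-raising lookups)
def pvGetAt (matrix : List (List Int)) (i j : Int) : Option Int :=
  (PySem.List.pyGet? matrix i).bind (fun row => PySem.List.pyGet? row j)

-- 'for p in idxs: total += matrix[p.1][p.2]' threaded through Option (none = IndexError)
def pvAddSeg (matrix : List (List Int)) (idxs : List (Int × Int)) (t : Option Int) : Option Int :=
  idxs.foldl (fun acc p => acc.bind (fun s => (pvGetAt matrix p.1 p.2).map (fun v => s + v))) t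

-- the while-loop of A; fuel only makes the recursion structural (h+w is always enough)
def pvLoopA (matrix : List (List Int)) : Nat → Int → Int → Int → Int → Option Int → Option Int
  | 0, _, _, _, _, t => t
  | fuel+1, top, bottom, left, right, t =>
    if top ≤ bottom ∧ left ≤ right then
      -- top row, left → right
      let t := pvAddSeg matrix ((PySem.List.pyRange left (right+1) 1).map (fun j => (top, j))) t
      let top := top + 1
      -- right column, top → bottom
      let t := pvAddSeg matrix ((PySem.List.pyRange top (bottom+1) 1).map (fun i => (i, right))) t
      let right := right - 1
      -- bottom row, right → left (guarded)
      let p1 : Option Int × Int :=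
        if top ≤ bottom then
          (pvAddSeg matrix ((PySem.List.pyRange right (left-1) (-1)).map (fun j => (bottom, j))) t,
           bottom - 1)
        else (t, bottom)
      -- left column, bottom → top (guarded)
      let p2 : Option Int × Int :=
        if left ≤ right then
          (pvAddSeg matrix ((PySem.List.pyRange p1.2 (top-1) (-1)).map (fun i => (i, left))) p1.1,
           left + 1)
        else (p1.1, left)
      pvLoopA matrix fuel top p1.2 p2.2 right p2.1
    else t

def spiral_sum (matrix : List (List Int)) : Int :=
  match matrix with
  | [] => 0
  | row0 :: _ =>
    if row0 = [] then 0
    else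
      (pvLoopA matrix (matrix.length + row0.length)
        0 ((matrix.length : Int) - 1) 0 ((row0.length : Int) - 1) (some 0)).getD 0

-- ===== PORT B =====
def spiral_sum_alt (matrix : List (List Int)) : Int :=
  match matrix with
  | [] => 0
  | row0 :: _ =>
    if row0 = [] then 0
    else
      (matrix.map (fun row =>
        (PySem.List.slice row none (some (row0.length : Int))).sum)).sum

-- ===== PRECONDITION & SPEC =====
-- Pre_ excludes exactly the ragged matrices on which A raises IndexError: some row
-- shorter than the first row (Python indexes every row up to len(matrix[0])-1).
def Pre_spiral_sum (matrix : List (List Int)) : Prop :=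
  ∀ row ∈ matrix, (matrix.headD []).length ≤ row.length

instance (matrix : List (List Int)) : Decidable (Pre_spiral_sum matrix) := by
  unfold Pre_spiral_sum; infer_instance

def pvWitness_spiral_sum : List (List Int) := [[1, 2, 3], [4, 5, 6], [7, 8, 9]]

def Spec_spiral_sum (matrix : List (List Int)) (out : Int) : Prop := out = spiral_sum_alt matrix
instance (matrix : List (List Int)) (out : Int) : Decidable (Spec_spiral_sum matrix out) := by
  unfold Spec_spiral_sum; infer_instance

-- ===== CLAIM (what is proved, stated in full; the proofs are below) =====
def Claim_equal_spiral_sum : Prop := ∀ (matrix : List (List Int)), Dom_spiral_sum matrix → Pre_spiral_sum matrix → Spec_spiral_sum matrix (spiral_sum matrix)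

-- ===== LEMMAS AND PROOFS =====

-- total cell access (equal to pvGetAt on in-range indices)
def pvG (matrix : List (List Int)) (i j : Int) : Int :=
  PySem.List.pyGetD (PySem.List.pyGetD matrix i []) j 0

theorem pvGetAt_eq_some (matrix : List (List Int)) (i j : Int)
    (hpre : Pre_spiral_sum matrix)
    (hi0 : 0 ≤ i) (hih : i < matrix.length)
    (hj0 : 0 ≤ j) (hjw : j < (matrix.headD []).length) :
    pvGetAt matrix i j = some (pvG matrix i j) := by
  have hrow : matrix[i.toNat] ∈ matrix := List.getElem_mem (by omega)
  have hlen := hpre _ hrow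
  have hjr : j < (matrix[i.toNat] : List Int).length := by omega
  rw [pvGetAt, pvG,
    PySem.List.pyGet?_eq_some_getElem matrix hi0 hih,
    PySem.List.pyGetD_eq_getElem matrix ([] : List Int) hi0 hih,
    Option.bind_some,
    PySem.List.pyGet?_eq_some_getElem _ hj0 hjr,
    PySem.List.pyGetD_eq_getElem _ (0 : Int) hj0 hjr]

theorem pvAddSeg_eq (matrix : List (List Int)) (l : List (Int × Int)) (t : Int)
    (h : ∀ p ∈ l, pvGetAt matrix p.1 p.2 = some (pvG matrix p.1 p.2)) :
    pvAddSeg matrix l (some t) = some (t + (l.map (fun p => pvG matrix p.1 p.2)).sum) := by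
  induction l generalizing t with
  | nil => simp [pvAddSeg]
  | cons p l ih =>
    have hp := h p (List.mem_cons_self)
    have := ih (t + pvG matrix p.1 p.2) (fun q hq => h q (List.mem_cons_of_mem _ hq))
    simp only [pvAddSeg, List.foldl_cons, hp, Option.bind_some, Option.map_some] at this ⊢
    rw [this, List.map_cons, List.sum_cons]
    congr 1; ring

def pvSrow (matrix : List (List Int)) (i L R : Int) : Int :=
  ((PySem.List.pyRange L (R+1) 1).map (pvG matrix i)).sum
def pvCol (matrix : List (List Int)) (T B c : Int) : Int :=
  ((PySem.List.pyRange T (B+1) 1).map (fun i => pvG matrix i c)).sum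
def pvS (matrix : List (List Int)) (T B L R : Int) : Int :=
  ((PySem.List.pyRange T (B+1) 1).map (fun i => pvSrow matrix i L R)).sum

theorem pvSrow_empty (matrix : List (List Int)) (i L R : Int) (h : R < L) :
    pvSrow matrix i L R = 0 := by
  rw [pvSrow, PySem.List.pyRange_one_eq_nil (by omega)]; rfl

theorem pvS_empty_rows (matrix : List (List Int)) (T B L R : Int) (h : B < T) :
    pvS matrix T B L R = 0 := by
  rw [pvS, PySem.List.pyRange_one_eq_nil (by omega)]; rfl

theorem pvS_empty_cols (matrix : List (List Int)) (T B L R : Int) (h : R < L) :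
    pvS matrix T B L R = 0 := by
  rw [pvS]
  have : ∀ i ∈ PySem.List.pyRange T (B+1) 1, pvSrow matrix i L R = 0 :=
    fun i _ => pvSrow_empty matrix i L R h
  rw [List.map_congr_left this]
  simp

theorem pvS_top (matrix : List (List Int)) (T B L R : Int) (h : T ≤ B) :
    pvS matrix T B L R = pvSrow matrix T L R + pvS matrix (T+1) B L R := by
  rw [pvS, pvS, PySem.List.pyRange_one_cons (by omega)]
  simp

theorem pvS_bottom (matrix : List (List Int)) (T B L R : Int) (h : T ≤ B) :
    pvS matrix T B L R = pvS matrix T (B-1) L R + pvSrow matrix B L R := by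
  rw [pvS, pvS]
  have : B + 1 = (B - 1) + 1 + 1 := by ring
  rw [this, PySem.List.pyRange_one_succ_right (by omega)]
  simp

theorem pvS_right (matrix : List (List Int)) (T B L R : Int) (h : L ≤ R) :
    pvS matrix T B L R = pvS matrix T B L (R-1) + pvCol matrix T B R := by
  rw [pvS, pvS, pvCol]
  have key : ∀ i, pvSrow matrix i L R = pvSrow matrix i L (R-1) + pvG matrix i R := by
    intro i
    rw [pvSrow, pvSrow]
    have : R + 1 = (R - 1) + 1 + 1 := by ring
    rw [this, PySem.List.pyRange_one_succ_right (by omega)]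
    simp
  simp only [key]
  rw [← List.sum_map_add]

theorem pvS_left (matrix : List (List Int)) (T B L R : Int) (h : L ≤ R) :
    pvS matrix T B L R = pvCol matrix T B L + pvS matrix T B (L+1) R := by
  rw [pvS, pvS, pvCol]
  have key : ∀ i, pvSrow matrix i L R = pvG matrix i L + pvSrow matrix i (L+1) R := by
    intro i
    rw [pvSrow, pvSrow, PySem.List.pyRange_one_cons (by omega)]
    simp
  simp only [key]
  rw [← List.sum_map_add]

theorem pvLoopA_eq (matrix : List (List Int)) (hpre : Pre_spiral_sum matrix) :
    ∀ (fuel : Nat) (T B L R t : Int),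
    0 ≤ T → 0 ≤ L → B < matrix.length → R < (matrix.headD []).length →
    ((B+1-T).toNat + (R+1-L).toNat) ≤ 2*fuel →
    pvLoopA matrix fuel T B L R (some t) = some (t + pvS matrix T B L R) := by
  intro fuel
  induction fuel with
  | zero =>
    intro T B L R t hT hL hB hR hμ
    rw [pvLoopA, pvS_empty_rows matrix T B L R (by omega)]
    norm_num
  | succ fuel ih =>
    intro T B L R t hT hL hB hR hμ
    by_cases hc : T ≤ B ∧ L ≤ R
    · obtain ⟨hTB, hLR⟩ := hc
      -- segment 1: top row
      have seg1 : pvAddSeg matrix ((PySem.List.pyRange L (R+1) 1).map (fun j => (T, j))) (some t)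
          = some (t + pvSrow matrix T L R) := by
        rw [pvAddSeg_eq]
        · rw [List.map_map]; rfl
        · intro p hp
          simp only [List.mem_map, PySem.List.mem_pyRange_one] at hp
          obtain ⟨j, ⟨hj1, hj2⟩, rfl⟩ := hp
          exact pvGetAt_eq_some matrix T j hpre hT (by omega) (by omega) (by omega)
      -- segment 2: right column, rows T+1..B
      have seg2 : ∀ s, pvAddSeg matrix ((PySem.List.pyRange (T+1) (B+1) 1).map (fun i => (i, R))) (some s)
          = some (s + pvCol matrix (T+1) B R) := by
        intro s
        rw [pvAddSeg_eq]
        · rw [List.map_map]; rfl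
        · intro p hp
          simp only [List.mem_map, PySem.List.mem_pyRange_one] at hp
          obtain ⟨i, ⟨hi1, hi2⟩, rfl⟩ := hp
          exact pvGetAt_eq_some matrix i R hpre (by omega) (by omega) (by omega) (by omega)
      -- segment 3: bottom row reversed, cols L..R-1
      have seg3 : ∀ s, pvAddSeg matrix ((PySem.List.pyRange (R-1) (L-1) (-1)).map (fun j => (B, j))) (some s)
          = some (s + pvSrow matrix B L (R-1)) := by
        intro s
        rw [pvAddSeg_eq]
        · rw [List.map_map]
          congr 2
          rw [PySem.List.pyRange_neg_one_eq_reverse, pvSrow]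
          norm_num
          rfl
        · intro p hp
          simp only [List.mem_map, PySem.List.mem_pyRange_neg_one] at hp
          obtain ⟨j, ⟨hj1, hj2⟩, rfl⟩ := hp
          exact pvGetAt_eq_some matrix B j hpre (by omega) (by omega) (by omega) (by omega)
      -- segment 4: left column reversed, rows T+1..B'
      have seg4 : ∀ s B', T ≤ B' → B' ≤ B → pvAddSeg matrix ((PySem.List.pyRange B' ((T+1)-1) (-1)).map (fun i => (i, L))) (some s)
          = some (s + pvCol matrix (T+1) B' L) := by
        intro s B' hB1 hB2
        rw [pvAddSeg_eq]
        · rw [List.map_map]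
          congr 2
          rw [PySem.List.pyRange_neg_one_eq_reverse, pvCol]
          norm_num
          rfl
        · intro p hp
          simp only [List.mem_map, PySem.List.mem_pyRange_neg_one] at hp
          obtain ⟨i, ⟨hi1, hi2⟩, rfl⟩ := hp
          exact pvGetAt_eq_some matrix i L hpre (by omega) (by omega) (by omega) (by omega)
      rw [pvLoopA, if_pos ⟨hTB, hLR⟩]
      simp only [seg1]
      rw [seg2]
      by_cases hg1 : T + 1 ≤ B
      · rw [if_pos hg1]
        by_cases hg2 : L ≤ R - 1
        · rw [if_pos hg2]
          simp only
          rw [seg3, seg4 _ (B-1) (by omega) (by omega),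
            ih (T+1) (B-1) (L+1) (R-1) _ (by omega) (by omega) (by omega) (by omega) (by omega)]
          rw [pvS_top matrix T B L R hTB,
            pvS_right matrix (T+1) B L R hLR,
            pvS_bottom matrix (T+1) B L (R-1) hg1,
            pvS_left matrix (T+1) (B-1) L (R-1) hg2]
          congr 1; ring
        · rw [if_neg hg2]
          simp only
          rw [seg3, ih (T+1) (B-1) L (R-1) _ (by omega) (by omega) (by omega) (by omega) (by omega)]
          rw [pvS_top matrix T B L R hTB,
            pvS_right matrix (T+1) B L R hLR,
            pvS_bottom matrix (T+1) B L (R-1) hg1,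
            pvS_empty_cols matrix (T+1) (B-1) L (R-1) (by omega),
            pvSrow_empty matrix B L (R-1) (by omega)]
          congr 1; ring
      · rw [if_neg hg1]
        by_cases hg2 : L ≤ R - 1
        · rw [if_pos hg2]
          simp only
          rw [seg4 _ B (by omega) (by omega),
            ih (T+1) B (L+1) (R-1) _ (by omega) (by omega) (by omega) (by omega) (by omega)]
          rw [pvS_top matrix T B L R hTB,
            pvS_right matrix (T+1) B L R hLR,
            pvS_empty_rows matrix (T+1) B L (R-1) (by omega),
            pvS_empty_rows matrix (T+1) B (L+1) (R-1) (by omega)]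
          have hcol : pvCol matrix (T+1) B L = 0 := by
            rw [pvCol, PySem.List.pyRange_one_eq_nil (by omega)]; rfl
          rw [hcol]
          congr 1; ring
        · rw [if_neg hg2]
          simp only
          rw [ih (T+1) B L (R-1) _ (by omega) (by omega) (by omega) (by omega) (by omega)]
          rw [pvS_top matrix T B L R hTB,
            pvS_right matrix (T+1) B L R hLR,
            pvS_empty_rows matrix (T+1) B L (R-1) (by omega)]
          have hcol : pvCol matrix (T+1) B R = 0 := by
            rw [pvCol, PySem.List.pyRange_one_eq_nil (by omega)]; rfl
          rw [hcol]
          congr 1; ring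
    · rw [pvLoopA, if_neg hc]
      rcases (not_and_or.mp hc) with h | h
      · rw [pvS_empty_rows matrix T B L R (by omega)]; norm_num
      · rw [pvS_empty_cols matrix T B L R (by omega)]; norm_num

theorem map_getD_range_eq_take (row : List Int) (w : Nat) (h : w ≤ row.length) :
    (List.range w).map (fun k => row.getD k 0) = row.take w := by
  apply List.ext_getElem
  · simp [h]
  · intro k h1 h2
    simp only [List.getElem_map, List.getElem_range, List.getElem_take]
    rw [List.getD_eq_getElem]

theorem pvSrow_take (matrix : List (List Int)) (i : Int) (w : Nat)
    (hw : w ≤ (PySem.List.pyGetD matrix i ([] : List Int)).length) :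
    pvSrow matrix i 0 ((w : Int) - 1) = ((PySem.List.pyGetD matrix i ([] : List Int)).take w).sum := by
  rw [pvSrow]
  have h1 : (w : Int) - 1 + 1 = (w : Int) := by ring
  rw [h1, PySem.List.pyRange_one 0 (w : Int)]
  have h2 : ((w : Int) - 0).toNat = w := by omega
  rw [h2, List.map_map, ← map_getD_range_eq_take _ w hw]
  congr 1
  apply List.map_congr_left
  intro k _
  simp [pvG]

theorem spiral_alt_eq (matrix : List (List Int)) (row0 : List Int) (rest : List (List Int))
    (hm : matrix = row0 :: rest) (hpre : Pre_spiral_sum matrix) :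
    pvS matrix 0 ((matrix.length : Int) - 1) 0 ((row0.length : Int) - 1)
      = (matrix.map (fun row => (PySem.List.slice row none (some (row0.length : Int))).sum)).sum := by
  have hhead : matrix.headD [] = row0 := by rw [hm]; rfl
  rw [pvS]
  have h1 : (matrix.length : Int) - 1 + 1 = (matrix.length : Int) := by ring
  rw [h1]
  have hcong : ∀ i ∈ PySem.List.pyRange 0 (matrix.length : Int) 1,
      pvSrow matrix i 0 ((row0.length : Int) - 1)
        = (fun row => (row.take row0.length).sum) (PySem.List.pyGetD matrix i ([] : List Int)) := by
    intro i hi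
    rw [PySem.List.mem_pyRange_one] at hi
    apply pvSrow_take
    have hin : PySem.Raise.InRange matrix.length i := by
      simp [PySem.Raise.InRange]; omega
    have hmem : PySem.List.pyGetD matrix i ([] : List Int) ∈ matrix :=
      PySem.List.pyGetD_mem matrix ([] : List Int) hin
    have := hpre _ hmem
    rw [hhead] at this; exact this
  rw [List.map_congr_left hcong]
  have hmm : List.map (fun a => (fun row => (List.take row0.length row).sum) (PySem.List.pyGetD matrix a ([] : List Int))) (PySem.List.pyRange 0 (matrix.length : Int) 1)
      = List.map (fun row => (List.take row0.length row).sum) (List.map (fun a => PySem.List.pyGetD matrix a ([] : List Int)) (PySem.List.pyRange 0 (matrix.length : Int) 1)) := by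
    rw [List.map_map]; rfl
  rw [hmm, PySem.List.map_pyGetD_pyRange_zero']
  apply congrArg
  apply List.map_congr_left
  intro row _
  rw [PySem.List.slice_to_natCast]

theorem pvMain : ∀ (matrix : List (List Int)), Pre_spiral_sum matrix → spiral_sum matrix = spiral_sum_alt matrix := by
  intro matrix hpre
  match matrix with
  | [] => rfl
  | row0 :: rest =>
    by_cases h0 : row0 = []
    · simp [spiral_sum, spiral_sum_alt, h0]
    · rw [spiral_sum, spiral_sum_alt, if_neg h0, if_neg h0]
      have hhead : (row0 :: rest).headD [] = row0 := rfl
      rw [pvLoopA_eq (row0 :: rest) hpre _ _ _ _ _ _ (by omega) (by omega)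
        (by omega) (by rw [hhead]; omega) (by simp)]
      rw [Option.getD_some, zero_add]
      exact spiral_alt_eq (row0 :: rest) row0 rest rfl hpre

-- ===== VERDICT (by name: the statement is the Claim_ definition above) =====
theorem spiral_sum_spec : Claim_equal_spiral_sum := by
  intro matrix _ hpre
  unfold Spec_spiral_sum
  exact pvMain matrix hpre
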